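-- pv_equiv track=rewrite | github.com/MrBrantCode/unitest_baseline | mut_generate/mist_train_taco/taco_16462/solution.py | find_short_phrase_start
-- ===== SOURCE A (Python) =====
-- def find_short_phrase_start(word_lengths):
--     tanku = [5, 7, 5, 7, 7]
--     n = len(word_lengths)
--
--     for i in range(n):
--         sum_lengths = 0
--         k = 0
--         for j in range(i, n):
--             sum_lengths += word_lengths[j]
--             if sum_lengths == tanku[k]:
--                 sum_lengths = 0
--                 k += 1
--                 if k == 5:
--                     return i + 1
--             elif sum_lengths > tanku[k]:
--                 break
--
--     return -1  # This line should never be reached if the input guarantees a Short Phrase.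
-- ===== SOURCE B (Python) =====
-- def find_short_phrase_start(word_lengths):
--     # Prefix-sum table + recursive target chase: for each start, find the first
--     # prefix index reaching each cumulative goal (5,12,17,24,31 from the start)
--     # and require an exact hit at every stage.
--     p = [0]
--     for x in word_lengths:
--         p.append(p[-1] + x)
--     targets = [5, 7, 5, 7, 7]
--
--     def chase(pos, remaining):
--         if not remaining:
--             return True
--         goal = p[pos] + remaining[0]
--         j = pos
--         while j + 1 < len(p):
--             j += 1
--             if p[j] >= goal:
--                 return p[j] == goal and chase(j, remaining[1:])
--         return False
--
--     for i in range(len(word_lengths)):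
--         if chase(i, targets):
--             return i + 1
--     return -1
-- ===== Notes on version B (the rewrite author's own statement) =====
-- stated objective: alternative
-- what changed: Replaces A's nested accumulate-and-break scan with a prefix-sum table built once plus a recursive chase that, for each start, finds the first prefix index reaching each cumulative goal (start+5,12,17,24,31) and requires an exact hit.
import Mathlib
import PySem

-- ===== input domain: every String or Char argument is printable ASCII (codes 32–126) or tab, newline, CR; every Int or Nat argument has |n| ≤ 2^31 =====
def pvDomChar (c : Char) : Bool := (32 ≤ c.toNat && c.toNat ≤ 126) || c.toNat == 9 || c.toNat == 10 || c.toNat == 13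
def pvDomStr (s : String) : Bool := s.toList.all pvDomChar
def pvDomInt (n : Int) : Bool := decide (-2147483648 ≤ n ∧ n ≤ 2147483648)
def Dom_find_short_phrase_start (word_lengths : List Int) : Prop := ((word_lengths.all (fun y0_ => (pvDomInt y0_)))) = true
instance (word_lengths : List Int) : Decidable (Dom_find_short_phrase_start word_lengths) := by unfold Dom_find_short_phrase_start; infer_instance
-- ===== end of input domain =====

-- B replaces A's nested accumulate-and-break scan by a prefix-sum table with a
-- recursive first-index-reaching-goal chase through the five targets (alternative
-- decomposition, same worst-case cost).

-- ===== PORT A =====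
-- inner 'for j in range(i, n)' loop of A, state (j, sum_lengths, k);
-- 'some r' = 'return r' fired, 'none' = break or normal loop exit
def pvAInner (wl : List Int) (i : Nat) (j : Nat) (sum : Int) (k : Nat) : Option Int :=
  if _h : j < wl.length then
    let tanku : List Int := [5, 7, 5, 7, 7]
    let sum' := sum + wl.getD j 0
    if sum' = tanku.getD k 0 then
      if k + 1 = 5 then some ((i : Int) + 1)
      else pvAInner wl i (j + 1) 0 (k + 1)
    else if sum' > tanku.getD k 0 then none
    else pvAInner wl i (j + 1) sum' k
  else none
termination_by wl.length - j

-- outer 'for i in range(n)' loop of A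
def pvAOuter (wl : List Int) (i : Nat) : Int :=
  if _h : i < wl.length then
    match pvAInner wl i i 0 0 with
    | some r => r
    | none => pvAOuter wl (i + 1)
  else -1
termination_by wl.length - i

def find_short_phrase_start (word_lengths : List Int) : Int :=
  pvAOuter word_lengths 0

-- ===== PORT B =====
-- p = [0]; for x in word_lengths: p.append(p[-1] + x)
def pvBPrefix (wl : List Int) : List Int :=
  wl.foldl (fun p x => p ++ [p.getLastD 0 + x]) [0]

-- the 'while j + 1 < len(p): j += 1; if p[j] >= goal: …' search of chase
def pvBFirstGe (p : List Int) (goal : Int) (j : Nat) : Option Nat :=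
  if _h : j + 1 < p.length then
    if goal ≤ p.getD (j + 1) 0 then some (j + 1) else pvBFirstGe p goal (j + 1)
  else none
termination_by p.length - j

-- chase(pos, remaining)
def pvBChase (p : List Int) (pos : Nat) : List Int → Bool
  | [] => true
  | t :: rest =>
    match pvBFirstGe p (p.getD pos 0 + t) pos with
    | some j => (p.getD j 0 == p.getD pos 0 + t) && pvBChase p j rest
    | none => false

-- 'for i in range(len(word_lengths))' loop of B
def pvBOuter (wl : List Int) (p : List Int) (i : Nat) : Int :=
  if _h : i < wl.length then
    if pvBChase p i [5, 7, 5, 7, 7] then (i : Int) + 1 else pvBOuter wl p (i + 1)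
  else -1
termination_by wl.length - i

def find_short_phrase_start_alt (word_lengths : List Int) : Int :=
  pvBOuter word_lengths (pvBPrefix word_lengths) 0

-- ===== PRECONDITION & SPEC =====
def Spec_find_short_phrase_start (word_lengths : List Int) (out : Int) : Prop := out = find_short_phrase_start_alt word_lengths
instance (word_lengths : List Int) (out : Int) : Decidable (Spec_find_short_phrase_start word_lengths out) := by unfold Spec_find_short_phrase_start; infer_instance

-- ===== CLAIM (what is proved, stated in full; the proofs are below) =====
def Claim_equal_find_short_phrase_start : Prop := ∀ (word_lengths : List Int), Dom_find_short_phrase_start word_lengths → Spec_find_short_phrase_start word_lengths (find_short_phrase_start word_lengths)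

-- ===== LEMMAS AND PROOFS =====

-- B's chase resumed in the middle of a stage: first_ge has scanned up to j,
-- current stage is target k starting from prefix index m
def pvG (p : List Int) (k m j : Nat) : Bool :=
  match pvBFirstGe p (p.getD m 0 + ([5, 7, 5, 7, 7] : List Int).getD k 0) j with
  | some j' => (p.getD j' 0 == p.getD m 0 + ([5, 7, 5, 7, 7] : List Int).getD k 0)
      && pvBChase p j' (([5, 7, 5, 7, 7] : List Int).drop (k + 1))
  | none => false

theorem pvFirstGe_hit (p : List Int) (goal : Int) (j : Nat)
    (hjp : j + 1 < p.length) (hge : goal ≤ p.getD (j + 1) 0) :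
    pvBFirstGe p goal j = some (j + 1) := by
  rw [pvBFirstGe, dif_pos hjp, if_pos hge]

theorem pvFirstGe_miss (p : List Int) (goal : Int) (j : Nat)
    (hjp : j + 1 < p.length) (hnge : ¬ goal ≤ p.getD (j + 1) 0) :
    pvBFirstGe p goal j = pvBFirstGe p goal (j + 1) := by
  rw [pvBFirstGe, dif_pos hjp, if_neg hnge]

theorem pvFirstGe_end (p : List Int) (goal : Int) (j : Nat)
    (hjp : ¬ j + 1 < p.length) : pvBFirstGe p goal j = none := by
  rw [pvBFirstGe, dif_neg hjp]

theorem pvG_some (p : List Int) (k m j j' : Nat)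
    (h : pvBFirstGe p (p.getD m 0 + ([5, 7, 5, 7, 7] : List Int).getD k 0) j = some j') :
    pvG p k m j
      = ((p.getD j' 0 == p.getD m 0 + ([5, 7, 5, 7, 7] : List Int).getD k 0)
          && pvBChase p j' (([5, 7, 5, 7, 7] : List Int).drop (k + 1))) := by
  unfold pvG; rw [h]

theorem pvG_none (p : List Int) (k m j : Nat)
    (h : pvBFirstGe p (p.getD m 0 + ([5, 7, 5, 7, 7] : List Int).getD k 0) j = none) :
    pvG p k m j = false := by
  unfold pvG; rw [h]

theorem pvBPrefix_fold (xs acc : List Int) (a : Int) :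
    xs.foldl (fun p x => p ++ [p.getLastD 0 + x]) (acc ++ [a])
      = acc ++ List.scanl (· + ·) a xs := by
  induction xs generalizing acc a with
  | nil => simp [List.scanl_nil]
  | cons x xs ih =>
    simp only [List.foldl_cons, List.scanl_cons]
    have h1 : (acc ++ [a]).getLastD 0 = a := by simp
    rw [h1]
    have := ih (acc ++ [a]) (a + x)
    simpa using this

theorem pvBPrefix_eq (wl : List Int) :
    pvBPrefix wl = List.scanl (· + ·) 0 wl := by
  have := pvBPrefix_fold wl [] 0
  simpa [pvBPrefix] using this

theorem pvBPrefix_length (wl : List Int) :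
    (pvBPrefix wl).length = wl.length + 1 := by
  rw [pvBPrefix_eq]; simp [List.length_scanl]

theorem pvScanl_step (wl : List Int) (a : Int) (j : Nat) (hj : j < wl.length) :
    (List.scanl (· + ·) a wl).getD (j + 1) 0
      = (List.scanl (· + ·) a wl).getD j 0 + wl.getD j 0 := by
  induction wl generalizing a j with
  | nil => simp at hj
  | cons x xs ih =>
    cases j with
    | zero =>
      simp only [List.scanl_cons, List.getD_cons_succ, List.getD_cons_zero]
      cases xs with
      | nil => simp [List.scanl_nil]
      | cons y ys => simp [List.scanl_cons]
    | succ j =>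
      simp only [List.scanl_cons, List.getD_cons_succ]
      exact ih (a + x) j (by simpa using hj)

theorem pvPrefix_step (wl : List Int) (j : Nat) (hj : j < wl.length) :
    (pvBPrefix wl).getD (j + 1) 0
      = (pvBPrefix wl).getD j 0 + wl.getD j 0 := by
  rw [pvBPrefix_eq]; exact pvScanl_step wl 0 j hj

-- unfolding chase at stage k (k < 5) gives pvG started at the stage's own position
theorem pvChase_unfold (p : List Int) (m k : Nat) (hk : k < 5) :
    pvBChase p m (([5, 7, 5, 7, 7] : List Int).drop k) = pvG p k m m := by
  interval_cases k <;> rfl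

-- core correspondence: A's inner scan at state (j, sum = p[j] - p[m], k) returns
-- 'some (i+1)' exactly when B's resumed chase pvG k m j succeeds
theorem pvInner_eq (wl p : List Int) (hlen : p.length = wl.length + 1)
    (hstep : ∀ j, j < wl.length → p.getD (j + 1) 0 = p.getD j 0 + wl.getD j 0)
    (i : Nat) :
    ∀ j m k, k < 5 →
      pvAInner wl i j (p.getD j 0 - p.getD m 0) k
        = (if pvG p k m j then some ((i : Int) + 1) else none) := by
  intro j
  induction hfj : wl.length - j using Nat.strongRecOn generalizing j with
  | _ fuel ih =>
  intro m k hk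
  by_cases hlt : j < wl.length
  · have hsum : p.getD j 0 - p.getD m 0 + wl.getD j 0
        = p.getD (j + 1) 0 - p.getD m 0 := by
      have := hstep j hlt; omega
    have hjp : j + 1 < p.length := by omega
    rw [pvAInner]
    simp only [hlt, dif_pos]
    rw [hsum]
    by_cases heq : p.getD (j + 1) 0 - p.getD m 0 = ([5, 7, 5, 7, 7] : List Int).getD k 0
    · -- exact hit: first_ge finds j+1 with equality
      have hge : p.getD m 0 + ([5, 7, 5, 7, 7] : List Int).getD k 0 ≤ p.getD (j + 1) 0 := by omega
      have hfg := pvFirstGe_hit p (p.getD m 0 + ([5, 7, 5, 7, 7] : List Int).getD k 0) j hjp hge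
      have hpeq : (p.getD (j + 1) 0 == p.getD m 0 + ([5, 7, 5, 7, 7] : List Int).getD k 0) = true := by
        rw [beq_iff_eq]; omega
      rw [if_pos heq]
      by_cases hk5 : k + 1 = 5
      · have hdrop : (([5, 7, 5, 7, 7] : List Int).drop (k + 1)) = [] := by
          rw [hk5]; rfl
        rw [if_pos hk5, pvG_some p k m j (j + 1) hfg, hpeq, hdrop]
        simp [pvBChase]
      · rw [if_neg hk5]
        have hrec := ih (wl.length - (j + 1)) (by omega) (j + 1) rfl (j + 1) (k + 1) (by omega)
        rw [sub_self] at hrec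
        rw [hrec]
        have hG : pvG p k m j = pvG p (k + 1) (j + 1) (j + 1) := by
          rw [pvG_some p k m j (j + 1) hfg, hpeq]
          simp only [Bool.true_and]
          rw [pvChase_unfold p (j + 1) (k + 1) (by omega)]
        rw [hG]
    · by_cases hgt : p.getD (j + 1) 0 - p.getD m 0 > ([5, 7, 5, 7, 7] : List Int).getD k 0
      · -- overshoot: first_ge finds j+1 but equality fails
        have hge : p.getD m 0 + ([5, 7, 5, 7, 7] : List Int).getD k 0 ≤ p.getD (j + 1) 0 := by omega
        have hfg := pvFirstGe_hit p (p.getD m 0 + ([5, 7, 5, 7, 7] : List Int).getD k 0) j hjp hge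
        have hne : (p.getD (j + 1) 0 == p.getD m 0 + ([5, 7, 5, 7, 7] : List Int).getD k 0) = false := by
          rw [beq_eq_false_iff_ne]; omega
        rw [if_neg heq, if_pos hgt, pvG_some p k m j (j + 1) hfg, hne]
        simp
      · -- still below goal: both scans advance to j+1
        have hnge : ¬ p.getD m 0 + ([5, 7, 5, 7, 7] : List Int).getD k 0 ≤ p.getD (j + 1) 0 := by omega
        rw [if_neg heq, if_neg hgt]
        rw [ih (wl.length - (j + 1)) (by omega) (j + 1) rfl m k hk]
        have hG : pvG p k m j = pvG p k m (j + 1) := by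
          unfold pvG
          rw [pvFirstGe_miss p _ j hjp hnge]
        rw [hG]
  · -- j ≥ n: A exits the loop; first_ge finds nothing
    rw [pvAInner]
    simp only [hlt, dif_neg, not_false_iff]
    have hjp : ¬ j + 1 < p.length := by omega
    rw [pvG_none p k m j (pvFirstGe_end p _ j hjp)]
    simp

theorem pvOuter_eq (wl : List Int) : ∀ i, pvAOuter wl i = pvBOuter wl (pvBPrefix wl) i := by
  intro i
  induction hfi : wl.length - i using Nat.strongRecOn generalizing i with
  | _ fuel ih =>
  by_cases hlt : i < wl.length
  · rw [pvAOuter, pvBOuter]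
    simp only [hlt, dif_pos]
    have hinner := pvInner_eq wl (pvBPrefix wl) (pvBPrefix_length wl)
      (fun j hj => pvPrefix_step wl j hj) i i i 0 (by omega)
    rw [sub_self] at hinner
    rw [hinner]
    have hch : pvBChase (pvBPrefix wl) i [5, 7, 5, 7, 7] = pvG (pvBPrefix wl) 0 i i := by
      have := pvChase_unfold (pvBPrefix wl) i 0 (by omega)
      simpa using this
    rw [hch]
    by_cases hg : pvG (pvBPrefix wl) 0 i i
    · simp [hg]
    · simp only [Bool.not_eq_true] at hg
      simp only [hg, Bool.false_eq_true, if_false]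
      exact ih (wl.length - (i + 1)) (by omega) (i + 1) rfl
  · rw [pvAOuter, pvBOuter]
    simp [hlt]

-- ===== VERDICT (by name: the statement is the Claim_ definition above) =====
theorem find_short_phrase_start_spec : Claim_equal_find_short_phrase_start := by
  intro wl _
  unfold Spec_find_short_phrase_start find_short_phrase_start find_short_phrase_start_alt
  exact pvOuter_eq wl 0
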